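-- pv_equiv track=rewrite | github.com/itsredwan/tunedforum | functions.py | strip_ml_tags
-- ===== SOURCE A (Python) =====
-- def strip_ml_tags(in_text, begin_tag='<', end_tag='>'):
--   """Description: Removes all HTML/XML-like tags from the input text.
--   Inputs: s --> string of text
--   Outputs: text string without the tags
--
--   # doctest unit testing framework
--
--   >>> test_text = "Keep this Text <remove><me /> KEEP </remove> 123"
--   >>> strip_ml_tags(test_text)
--   'Keep this Text  KEEP  123'
--   """
--   # convert in_text to a mutable object (e.g. list)
--   s_list = list(in_text)
--   i,j = 0,0
--
--   while i < len(s_list):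
--     # iterate until a left-angle bracket is found
--     if s_list[i] == begin_tag:
--       while s_list[i] != end_tag:
--         # pop everything from the the left-angle bracket until the right-angle bracket
--         s_list.pop(i)
--       # pops the right-angle bracket, too
--       s_list.pop(i)
--     else:
--       i=i+1
--
--   # convert the list back into text
--   join_char=''
--   return join_char.join(s_list)
-- ===== SOURCE B (Python) =====
-- def strip_ml_tags(in_text, begin_tag='<', end_tag='>'):
--   out = []
--   inside = False
--   for ch in in_text:
--     if not inside and ch == begin_tag:
--       inside = True
--     if inside:
--       if ch == end_tag:
--         inside = False
--     else:
--       out.append(ch)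
--   return ''.join(out)
-- ===== Notes on version B (the rewrite author's own statement) =====
-- stated objective: simpler
-- what changed: Replaces the scan that repeatedly list.pop(i)s tag characters out of a mutable list with a single pass keeping an inside-tag flag and appending kept characters once.
import Mathlib
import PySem

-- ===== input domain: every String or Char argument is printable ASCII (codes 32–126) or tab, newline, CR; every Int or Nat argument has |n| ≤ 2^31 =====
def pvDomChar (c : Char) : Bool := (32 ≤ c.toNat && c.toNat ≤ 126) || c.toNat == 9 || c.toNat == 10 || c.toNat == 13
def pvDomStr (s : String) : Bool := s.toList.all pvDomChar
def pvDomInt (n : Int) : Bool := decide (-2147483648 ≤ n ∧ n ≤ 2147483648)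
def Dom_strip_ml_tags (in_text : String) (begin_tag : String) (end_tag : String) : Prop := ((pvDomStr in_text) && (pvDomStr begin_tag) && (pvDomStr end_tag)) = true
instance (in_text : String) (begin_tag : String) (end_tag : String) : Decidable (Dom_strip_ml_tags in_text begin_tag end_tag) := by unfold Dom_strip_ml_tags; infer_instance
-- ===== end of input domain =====

-- B replaces A's pop-in-place loop over a mutable list by a single pass with an inside-tag
-- flag (objective: simpler). Equality proved on Pre_ (A raises IndexError elsewhere).

-- ===== PORT A =====
-- Python `s_list[i] == begin_tag`: equality of the 1-char string s_list[i] with the tag string.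
def pvCharEq (c : Char) (t : String) : Bool := String.mk [c] == t

-- inner `while s_list[i] != end_tag: s_list.pop(i)` then `s_list.pop(i)`;
-- none = IndexError (pop past the end). The fuel counter only totalizes the loop
-- (each iteration removes one element, so `l.length + 1` fuel is never exhausted).
def pvInnerA (e : String) (fuel : Nat) (l : List Char) (i : Nat) : Option (List Char) :=
  match fuel with
  | 0 => none
  | fuel + 1 =>
    if h : i < l.length then
      if pvCharEq l[i] e then some (l.eraseIdx i)
      else pvInnerA e fuel (l.eraseIdx i) i
    else none

-- outer `while i < len(s_list)` loop of A; fuel `2 * len + 1` only totalizes it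
-- (each iteration advances i or shortens the list).
def pvOuterA (b e : String) (fuel : Nat) (l : List Char) (i : Nat) : Option (List Char) :=
  match fuel with
  | 0 => none
  | fuel + 1 =>
    if h : i < l.length then
      if pvCharEq l[i] b then
        match pvInnerA e (l.length + 1) l i with
        | some l' => pvOuterA b e fuel l' i
        | none => none
      else pvOuterA b e fuel l (i + 1)
    else some l

def strip_ml_tags (in_text : String) (begin_tag : String) (end_tag : String) : String :=
  match pvOuterA begin_tag end_tag (2 * in_text.toList.length + 1) in_text.toList 0 with
  | some l => String.mk l   -- ''.join(s_list)
  | none => ""              -- unreachable under Pre_ (A raises IndexError there)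

-- ===== PORT B =====
-- Source B's single pass: `inside` flag, append kept chars to `out`.
def pvLoopB (b e : String) (l : List Char) (inside : Bool) (acc : List Char) : List Char :=
  match l with
  | [] => acc
  | c :: r =>
    let inside1 := if !inside && pvCharEq c b then true else inside
    if inside1 then pvLoopB b e r (if pvCharEq c e then false else inside1) acc
    else pvLoopB b e r inside1 (acc ++ [c])

def strip_ml_tags_alt (in_text : String) (begin_tag : String) (end_tag : String) : String :=
  String.mk (pvLoopB begin_tag end_tag in_text.toList false [])

-- ===== PRECONDITION & SPEC =====
-- Pre_ excludes exactly the inputs on which A raises IndexError: a begin_tag character with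
-- no end_tag character at or after its position (an unclosed tag). pvPreOk checks that
-- every begin_tag character is followed (at or after it) by an end_tag character.
def pvPreOk (b e : String) : List Char → Bool
  | [] => true
  | c :: r => (!pvCharEq c b || (c :: r).any (fun d => pvCharEq d e)) && pvPreOk b e r

def Pre_strip_ml_tags (in_text : String) (begin_tag : String) (end_tag : String) : Prop :=
  pvPreOk begin_tag end_tag in_text.toList = true

instance (in_text : String) (begin_tag : String) (end_tag : String) : Decidable (Pre_strip_ml_tags in_text begin_tag end_tag) := by unfold Pre_strip_ml_tags; infer_instance

def pvWitness_strip_ml_tags : String × String × String := ("Keep <a><b/> this> x", "<", ">")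

def Spec_strip_ml_tags (in_text : String) (begin_tag : String) (end_tag : String) (out : String) : Prop := out = strip_ml_tags_alt in_text begin_tag end_tag
instance (in_text : String) (begin_tag : String) (end_tag : String) (out : String) : Decidable (Spec_strip_ml_tags in_text begin_tag end_tag out) := by unfold Spec_strip_ml_tags; infer_instance

-- ===== CLAIM (what is proved, stated in full; the proofs are below) =====
def Claim_equal_strip_ml_tags : Prop := ∀ (in_text : String) (begin_tag : String) (end_tag : String), Dom_strip_ml_tags in_text begin_tag end_tag → Pre_strip_ml_tags in_text begin_tag end_tag → Spec_strip_ml_tags in_text begin_tag end_tag (strip_ml_tags in_text begin_tag end_tag)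
-- ===== LEMMAS AND PROOFS =====

theorem pvPreOk_suffix (b e : String) (x y : List Char)
    (h : pvPreOk b e (x ++ y) = true) : pvPreOk b e y = true := by
  induction x with
  | nil => exact h
  | cons c r ih =>
      apply ih
      have := (Bool.and_eq_true _ _).mp h
      exact this.2

theorem pvLoopB_acc (b e : String) (l : List Char) (inside : Bool) (acc : List Char) :
    pvLoopB b e l inside acc = acc ++ pvLoopB b e l inside [] := by
  induction l generalizing inside acc with
  | nil => simp [pvLoopB]
  | cons c r ih =>
      simp only [pvLoopB]
      split_ifs <;>
        first
          | exact ih _ _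
          | (rw [ih _ (acc ++ [c]), ih _ ([] ++ [c])]; simp)

-- while inside a tag, B skips chars until the end_tag char.
theorem pvLoopB_skip (b e : String) (p : List Char) (ech : Char) (s : List Char)
    (hp : ∀ d ∈ p, pvCharEq d e = false) (he : pvCharEq ech e = true) (acc : List Char) :
    pvLoopB b e (p ++ ech :: s) true acc = pvLoopB b e s false acc := by
  induction p with
  | nil => simp [pvLoopB, he]
  | cons d p' ih =>
      have hd : pvCharEq d e = false := hp d (by simp)
      simp only [List.cons_append, pvLoopB, Bool.not_true, Bool.false_and, if_true, hd,
        Bool.false_eq_true, if_false]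
      exact ih (fun x hx => hp x (by simp [hx]))

theorem pvEraseIdx_append (kept : List Char) (x : Char) (s : List Char) :
    (kept ++ x :: s).eraseIdx kept.length = kept ++ s := by
  induction kept with
  | nil => simp
  | cons a t ih => simp [ih]

-- the inner pop loop removes everything up to and including the first end_tag char.
theorem pvInnerA_eq (e : String) (kept : List Char) (p : List Char) (ech : Char) (s : List Char)
    (hp : ∀ d ∈ p, pvCharEq d e = false) (he : pvCharEq ech e = true) :
    ∀ (fuel : Nat), p.length + 1 ≤ fuel →
    pvInnerA e fuel (kept ++ p ++ ech :: s) kept.length = some (kept ++ s) := by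
  induction p with
  | nil =>
      intro fuel hfuel
      obtain ⟨f, rfl⟩ : ∃ f, fuel = f + 1 := ⟨fuel - 1, by omega⟩
      rw [pvInnerA]
      have hlen : kept.length < (kept ++ [] ++ ech :: s).length := by simp
      rw [dif_pos hlen]
      have hget : (kept ++ [] ++ ech :: s)[kept.length]'hlen = ech := by
        simp [List.getElem_append_right]
      rw [hget, if_pos he]
      simp [pvEraseIdx_append]
  | cons d p' ih =>
      intro fuel hfuel
      obtain ⟨f, rfl⟩ : ∃ f, fuel = f + 1 := ⟨fuel - 1, by omega⟩
      rw [pvInnerA]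
      have hlen : kept.length < (kept ++ (d :: p') ++ ech :: s).length := by simp
      rw [dif_pos hlen]
      have hget : (kept ++ (d :: p') ++ ech :: s)[kept.length]'hlen = d := by
        simp [List.getElem_append_right]
      have hd : pvCharEq d e = false := hp d (by simp)
      rw [hget, hd]
      simp only [Bool.false_eq_true, if_false]
      have heq : (kept ++ (d :: p') ++ ech :: s).eraseIdx kept.length = kept ++ p' ++ ech :: s := by
        have := pvEraseIdx_append kept d (p' ++ ech :: s); simpa using this
      rw [heq]
      exact ih (fun x hx => hp x (by simp [hx])) f (by simp at hfuel ⊢; omega)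

-- stepping lemmas for A's outer loop
theorem pvOuterA_pop (b e : String) (fuel : Nat) (l : List Char) (i : Nat) (h : i < l.length)
    (hb : pvCharEq (l[i]'h) b = true) (l' : List Char)
    (hm : pvInnerA e (l.length + 1) l i = some l') :
    pvOuterA b e (fuel + 1) l i = pvOuterA b e fuel l' i := by
  rw [pvOuterA]
  simp only [dif_pos h, if_pos hb, hm]

theorem pvOuterA_adv (b e : String) (fuel : Nat) (l : List Char) (i : Nat) (h : i < l.length)
    (hb : pvCharEq (l[i]'h) b = false) :
    pvOuterA b e (fuel + 1) l i = pvOuterA b e fuel l (i + 1) := by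
  rw [pvOuterA, dif_pos h]
  simp [hb]

theorem pvOuterA_done (b e : String) (fuel : Nat) (l : List Char) (i : Nat) (h : ¬ i < l.length) :
    pvOuterA b e (fuel + 1) l i = some l := by
  rw [pvOuterA, dif_neg h]

theorem pvDropWhile_head {α : Type} (p : α → Bool) :
    ∀ (l : List α) (a : α) (t : List α), List.dropWhile p l = a :: t → p a = false := by
  intro l
  induction l with
  | nil => intro a t h; simp at h
  | cons x xs ih =>
      intro a t h
      rw [List.dropWhile_cons] at h
      split at h
      · exact ih a t h
      · rename_i hx
        injection h with h1 _
        subst h1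
        simpa using hx

-- main invariant: with enough fuel, A's outer loop from position kept.length on
-- kept ++ rest equals kept ++ (B's machine on rest).
theorem pvMain (b e : String) : ∀ n (rest kept : List Char) (fuel : Nat), rest.length ≤ n →
    kept.length + 2 * rest.length + 1 ≤ fuel →
    pvPreOk b e rest = true →
    pvOuterA b e fuel (kept ++ rest) kept.length = some (kept ++ pvLoopB b e rest false []) := by
  intro n
  induction n with
  | zero =>
      intro rest kept fuel hn hf _
      have : rest = [] := by cases rest <;> simp_all
      subst this
      obtain ⟨f, rfl⟩ : ∃ f, fuel = f + 1 := ⟨fuel - 1, by omega⟩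
      simp only [List.append_nil]
      rw [pvOuterA_done b e f kept kept.length (by omega)]
      simp [pvLoopB]
  | succ n ih =>
      intro rest kept fuel hn hf hpre
      obtain ⟨f, rfl⟩ : ∃ f, fuel = f + 1 := ⟨fuel - 1, by omega⟩
      match rest with
      | [] =>
          simp only [List.append_nil]
          rw [pvOuterA_done b e f kept kept.length (by omega)]
          simp [pvLoopB]
      | c :: r =>
        have hlen : kept.length < (kept ++ c :: r).length := by simp
        have hget : (kept ++ c :: r)[kept.length]'hlen = c := by
          simp [List.getElem_append_right]
        by_cases hb : pvCharEq c b = true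
        · -- begin_tag char found: A pops a whole tag, B's flag goes up
          have hex : (c :: r).any (fun d => pvCharEq d e) = true := by
            have := (Bool.and_eq_true _ _).mp hpre
            have h1 := this.1
            rw [hb] at h1; simpa using h1
          -- split c :: r at the first end_tag char
          have hsplit : c :: r =
              (c :: r).takeWhile (fun d => !pvCharEq d e) ++
              (c :: r).dropWhile (fun d => !pvCharEq d e) := by
            simp
          set p := (c :: r).takeWhile (fun d => !pvCharEq d e) with hpdef
          set q := (c :: r).dropWhile (fun d => !pvCharEq d e) with hqdef
          have hqne : q ≠ [] := by
            intro hq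
            have hq' : List.dropWhile (fun d => !pvCharEq d e) (c :: r) = [] := by
              rw [← hqdef]; exact hq
            have hall := List.dropWhile_eq_nil_iff.mp hq'
            simp only [List.any_eq_true] at hex
            obtain ⟨d, hd1, hd2⟩ := hex
            have := hall d hd1
            simp [hd2] at this
          obtain ⟨ech, s, hq⟩ := List.exists_cons_of_ne_nil hqne
          have he : pvCharEq ech e = true := by
            have := pvDropWhile_head (fun d => !pvCharEq d e) (c :: r) ech s
              (by rw [← hqdef]; exact hq)
            simpa using this
          have hp : ∀ d ∈ p, pvCharEq d e = false := by
            intro d hd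
            have := List.mem_takeWhile_imp hd
            simpa using this
          have hlist : kept ++ c :: r = kept ++ p ++ ech :: s := by
            rw [List.append_assoc, ← hq, ← hsplit]
          have hplen : p.length + (ech :: s).length = (c :: r).length := by
            rw [hsplit, hq]; simp
          have hinner : pvInnerA e ((kept ++ c :: r).length + 1) (kept ++ c :: r) kept.length
              = some (kept ++ s) := by
            rw [hlist]
            exact pvInnerA_eq e kept p ech s hp he _ (by simp; omega)
          rw [pvOuterA_pop b e f (kept ++ c :: r) kept.length hlen (by rw [hget]; exact hb)
            (kept ++ s) hinner]
          have hslen : s.length ≤ n := by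
            simp at hplen hn; omega
          have hspre : pvPreOk b e s = true := by
            have hx : pvPreOk b e (c :: r) = true := hpre
            rw [hsplit, hq] at hx
            exact pvPreOk_suffix b e (p ++ [ech]) s (by simpa using hx)
          rw [ih s kept f hslen (by simp at hplen hf ⊢; omega) hspre]
          -- B side
          have hB : pvLoopB b e (c :: r) false [] = pvLoopB b e s false [] := by
            simp only [pvLoopB, Bool.not_false, Bool.true_and, hb, if_true]
            by_cases hce : pvCharEq c e = true
            · -- c itself is the end_tag char: q = c :: r
              have hqr : ech :: s = c :: r := by
                rw [← hq, hqdef, List.dropWhile_cons]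
                simp [hce]
              have hs : s = r := ((List.cons.injEq _ _ _ _).mp hqr).2
              rw [if_pos hce, hs]
            · have hce' : pvCharEq c e = false := by simpa using hce
              rw [hce']
              simp only [Bool.false_eq_true, if_false]
              have hr : r = (r.takeWhile (fun d => !pvCharEq d e)) ++ ech :: s := by
                have hq0 : q = r.dropWhile (fun d => !pvCharEq d e) := by
                  rw [hqdef, List.dropWhile_cons]; simp [hce']
                rw [← hq, hq0]; simp
              rw [hr]
              refine pvLoopB_skip b e _ ech s (fun d hd => ?_) he []
              have hdp : d ∈ p := by
                rw [hpdef, List.takeWhile_cons]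
                simp only [hce', Bool.not_false, if_true]
                simp [hd]
              exact hp d hdp
          rw [hB]
        · -- ordinary char: A advances i, B appends it
          have hb' : pvCharEq c b = false := by simpa using hb
          rw [pvOuterA_adv b e f (kept ++ c :: r) kept.length hlen (by rw [hget]; exact hb')]
          have hpre' : pvPreOk b e r = true := ((Bool.and_eq_true _ _).mp hpre).2
          have hrlen : r.length ≤ n := by simp at hn; omega
          have hrw : kept ++ c :: r = (kept ++ [c]) ++ r := by simp
          have hlen' : kept.length + 1 = (kept ++ [c]).length := by simp
          rw [hrw, hlen', ih r (kept ++ [c]) f hrlen (by simp at hf ⊢; omega) hpre']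
          have hB : pvLoopB b e (c :: r) false [] = c :: pvLoopB b e r false [] := by
            simp only [pvLoopB, hb', Bool.not_false, Bool.true_and, Bool.false_eq_true, if_false]
            rw [pvLoopB_acc]
            simp
          rw [hB]
          simp

-- ===== VERDICT (by name: the statement is the Claim_ definition above) =====
theorem strip_ml_tags_spec : Claim_equal_strip_ml_tags := by
  intro in_text begin_tag end_tag _ hpre
  unfold Spec_strip_ml_tags strip_ml_tags strip_ml_tags_alt
  have := pvMain begin_tag end_tag in_text.toList.length in_text.toList []
    (2 * in_text.toList.length + 1) le_rfl (by simp) hpre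
  simp only [List.nil_append, List.length_nil] at this
  rw [this]
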